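-- pv_equiv track=rewrite | github.com/SanthaKumar-K-2004/SRE | inference.py | _build_task2_plan
-- ===== SOURCE A (Python) =====
-- from typing import Any, Dict, List, Optional
--
-- def _build_task2_plan(incident_family: str, limit: int) -> List[str]:
--     """Return a deterministic diagnostic-only plan for task2."""
--     if incident_family in {"network_partition", "cascade_failure", "dependency_timeout"}:
--         base_plan = [
--             "inspect_logs",
--             "check_metrics",
--             "check_topology",
--             "check_service",
--         ]
--     elif incident_family == "config_error":
--         base_plan = [
--             "inspect_logs",
--             "check_service",
--             "check_metrics",
--             "check_topology",
--         ]
--     else: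
--         base_plan = [
--             "inspect_logs",
--             "check_metrics",
--             "check_service",
--             "check_topology",
--         ]
--
--     plan: List[str] = []
--     while len(plan) < limit:
--         plan.extend(base_plan)
--     return plan[:limit]
-- ===== SOURCE B (Python) =====
-- from typing import List
--
--
-- def _build_task2_plan(incident_family: str, limit: int) -> List[str]:
--     """Return a deterministic diagnostic-only plan for task2."""
--     if incident_family in {"network_partition", "cascade_failure", "dependency_timeout"}:
--         base_plan = [
--             "inspect_logs",
--             "check_metrics",
--             "check_topology",
--             "check_service",
--         ]
--     elif incident_family == "config_error":
--         base_plan = [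
--             "inspect_logs",
--             "check_service",
--             "check_metrics",
--             "check_topology",
--         ]
--     else:
--         base_plan = [
--             "inspect_logs",
--             "check_metrics",
--             "check_service",
--             "check_topology",
--         ]
--
--     return [base_plan[i % len(base_plan)] for i in range(limit)]
-- ===== Notes on version B (the rewrite author's own statement) =====
-- stated objective: idiomatic
-- what changed: Replaced the while-loop that repeatedly extends the plan by whole 4-element blocks and then slices it down with a single comprehension that computes each output position directly as base_plan[i % len(base_plan)] over range(limit).
import Mathlib
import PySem

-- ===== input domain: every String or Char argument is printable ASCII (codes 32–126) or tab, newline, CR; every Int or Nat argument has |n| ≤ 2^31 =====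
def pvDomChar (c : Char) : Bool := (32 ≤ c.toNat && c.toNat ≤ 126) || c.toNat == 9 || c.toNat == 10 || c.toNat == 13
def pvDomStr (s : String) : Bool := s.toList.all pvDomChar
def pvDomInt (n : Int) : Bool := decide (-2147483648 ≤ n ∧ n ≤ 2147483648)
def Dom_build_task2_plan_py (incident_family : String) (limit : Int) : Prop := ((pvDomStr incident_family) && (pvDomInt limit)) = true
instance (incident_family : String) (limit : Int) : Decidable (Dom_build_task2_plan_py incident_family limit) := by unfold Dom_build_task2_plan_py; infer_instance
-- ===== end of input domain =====

-- B replaces A's while-extend-then-slice block construction with a direct per-index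
-- comprehension base_plan[i % len(base_plan)] over range(limit) (idiomatic; same cost).

-- ===== PORT A =====
-- A's base_plan selection (the if/elif/else at the top of A); 'in {…}' is the disjunction of equalities.
def pvChoosePlanA (incident_family : String) : List String :=
  if incident_family = "network_partition" ∨ incident_family = "cascade_failure" ∨
      incident_family = "dependency_timeout" then
    ["inspect_logs", "check_metrics", "check_topology", "check_service"]
  else if incident_family = "config_error" then
    ["inspect_logs", "check_service", "check_metrics", "check_topology"]
  else
    ["inspect_logs", "check_metrics", "check_service", "check_topology"]

-- 'while len(plan) < limit: plan.extend(base_plan)'; the structural fuel parameter only makes the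
-- loop total — limit.toNat iterations always suffice, since each extend adds 4 elements
def pvWhileExtend (base : List String) (limit : Int) : Nat → List String → List String
  | 0, plan => plan
  | fuel + 1, plan =>
    if (plan.length : Int) < limit then pvWhileExtend base limit fuel (plan ++ base) else plan

def build_task2_plan_py (incident_family : String) (limit : Int) : List String :=
  PySem.List.slice
    (pvWhileExtend (pvChoosePlanA incident_family) limit limit.toNat [])
    none (some limit)    -- plan[:limit]

-- ===== PORT B =====
def build_task2_plan_py_alt (incident_family : String) (limit : Int) : List String :=
  let base_plan : List String :=
    if incident_family = "network_partition" ∨ incident_family = "cascade_failure" ∨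
        incident_family = "dependency_timeout" then
      ["inspect_logs", "check_metrics", "check_topology", "check_service"]
    else if incident_family = "config_error" then
      ["inspect_logs", "check_service", "check_metrics", "check_topology"]
    else
      ["inspect_logs", "check_metrics", "check_service", "check_topology"]
  (PySem.List.pyRange 0 limit 1).map
    (fun i => (PySem.List.pyGet? base_plan (PySem.Int.mod i (base_plan.length : Int))).getD "")
    -- the index i % len(base_plan) is always in range, so pyGet? is always some; .getD "" is never the default

-- ===== PRECONDITION & SPEC =====
def Spec_build_task2_plan_py (incident_family : String) (limit : Int) (out : List String) : Prop := out = build_task2_plan_py_alt incident_family limit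
instance (incident_family : String) (limit : Int) (out : List String) : Decidable (Spec_build_task2_plan_py incident_family limit out) := by unfold Spec_build_task2_plan_py; infer_instance

-- ===== CLAIM (what is proved, stated in full; the proofs are below) =====
def Claim_equal_build_task2_plan_py : Prop := ∀ (incident_family : String) (limit : Int), Dom_build_task2_plan_py incident_family limit → Spec_build_task2_plan_py incident_family limit (build_task2_plan_py incident_family limit)

-- ===== LEMMAS AND PROOFS =====

-- base repeated k times
def pvRep (base : List String) : Nat → List String
  | 0 => []
  | k + 1 => base ++ pvRep base k

theorem pvRep_length (base : List String) (k : Nat) :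
    (pvRep base k).length = base.length * k := by
  induction k with
  | zero => simp [pvRep]
  | succ k ih => simp [pvRep, ih, Nat.mul_succ]; ring

theorem pvRep_getElem? (base : List String) (k i : Nat) (h : i < base.length * k) :
    (pvRep base k)[i]? = base[i % base.length]? := by
  induction k generalizing i with
  | zero => omega
  | succ k ih =>
    have hL : 0 < base.length := by
      rcases Nat.eq_zero_or_pos base.length with h0 | h0
      · rw [h0, Nat.zero_mul] at h; omega
      · exact h0
    by_cases hi : i < base.length
    · rw [pvRep, List.getElem?_append_left hi, Nat.mod_eq_of_lt hi]
    · obtain ⟨j, rfl⟩ : ∃ j, i = base.length + j := ⟨i - base.length, by omega⟩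
      rw [pvRep, List.getElem?_append_right (by omega)]
      have : base.length + j - base.length = j := by omega
      rw [this, ih j (by rw [Nat.mul_succ] at h; omega), Nat.add_mod_left]

theorem pvWhileExtend_eq (base : List String) (limit : Int) :
    ∀ (fuel : Nat) (plan : List String),
      limit ≤ (plan.length : Int) + (fuel : Int) * (base.length : Int) →
      ∃ K, pvWhileExtend base limit fuel plan = plan ++ pvRep base K ∧
        limit ≤ ((plan ++ pvRep base K).length : Int) := by
  intro fuel
  induction fuel with
  | zero =>
    intro plan h
    exact ⟨0, by simp [pvWhileExtend, pvRep], by simp [pvRep]; omega⟩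
  | succ fuel ih =>
    intro plan h
    by_cases hc : (plan.length : Int) < limit
    · have hcast : ((fuel + 1 : Nat) : Int) * (base.length : Int)
          = (fuel : Int) * (base.length : Int) + (base.length : Int) := by push_cast; ring
      obtain ⟨K, hK, hlen⟩ := ih (plan ++ base)
        (by rw [hcast] at h; rw [List.length_append]; push_cast; linarith)
      refine ⟨K + 1, ?_, ?_⟩
      · rw [pvWhileExtend, if_pos hc, hK, List.append_assoc]; rfl
      · simpa [pvRep, List.append_assoc] using hlen
    · exact ⟨0, by rw [pvWhileExtend, if_neg hc]; simp [pvRep], by simp [pvRep]; omega⟩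

-- the core equality, generic in the selected base plan
theorem pv_main (base : List String) (hb : 0 < base.length) (limit : Int) :
    PySem.List.slice (pvWhileExtend base limit limit.toNat []) none (some limit)
      = (PySem.List.pyRange 0 limit 1).map
          (fun i => (PySem.List.pyGet? base (PySem.Int.mod i (base.length : Int))).getD "") := by
  by_cases hneg : limit ≤ 0
  · have h0 : limit.toNat = 0 := by omega
    rw [h0, pvWhileExtend]
    rw [PySem.List.pyRange_one_eq_nil hneg]
    simp [PySem.List.slice]
  · have hpos : 0 ≤ limit := by omega
    have henough : limit ≤ ((([] : List String).length : Int)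
        + (limit.toNat : Int) * (base.length : Int)) := by
      have h1 : (limit.toNat : Int) = limit := Int.toNat_of_nonneg hpos
      have h2 : (limit.toNat : Int) * 1 ≤ (limit.toNat : Int) * (base.length : Int) := by
        apply mul_le_mul_of_nonneg_left
        · exact_mod_cast hb
        · positivity
      simp only [List.length_nil, Int.natCast_zero, Int.zero_add]
      linarith [h2, h1.ge]
    obtain ⟨K, hK, hlen⟩ := pvWhileExtend_eq base limit limit.toNat [] henough
    simp only [List.nil_append] at hK hlen
    rw [hK]
    rw [PySem.List.slice_to _ hpos, PySem.List.pyRange_one]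
    rw [pvRep_length] at hlen
    apply List.ext_getElem?
    intro i
    by_cases hi : i < limit.toNat
    · have hiK : i < base.length * K := by omega
      have hmod : i % base.length < base.length := Nat.mod_lt _ hb
      rw [List.getElem?_take_of_lt hi, pvRep_getElem? base K i hiK]
      rw [List.getElem?_map, List.getElem?_map, List.getElem?_range (by simpa using hi)]
      simp only [Option.map_some]
      have : PySem.Int.mod ((0 : Int) + (i : Nat)) (base.length : Int)
          = ((i % base.length : Nat) : Int) := by
        rw [Int.zero_add]; exact PySem.Int.mod_natCast i base.length
      rw [this, PySem.List.pyGet?_natCast, List.getElem?_eq_getElem hmod]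
      rfl
    · rw [List.getElem?_eq_none, List.getElem?_eq_none]
      · simp; omega
      · simp; omega
  
-- the let-bound base in B is exactly pvChoosePlanA
theorem pv_alt_eq (incident_family : String) (limit : Int) :
    build_task2_plan_py_alt incident_family limit
      = (PySem.List.pyRange 0 limit 1).map
          (fun i => (PySem.List.pyGet? (pvChoosePlanA incident_family)
              (PySem.Int.mod i ((pvChoosePlanA incident_family).length : Int))).getD "") := by
  rw [build_task2_plan_py_alt, pvChoosePlanA]

-- ===== VERDICT (by name: the statement is the Claim_ definition above) =====
theorem build_task2_plan_py_spec : Claim_equal_build_task2_plan_py := by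
  intro incident_family limit _
  unfold Spec_build_task2_plan_py
  rw [build_task2_plan_py, pv_alt_eq]
  exact pv_main (pvChoosePlanA incident_family)
    (by unfold pvChoosePlanA; split_ifs <;> simp) limit
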